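-- pv_equiv track=rewrite | github.com/memory-eight-way/memory | quiz/make_quiz.py | proc_line_mask_short_word
-- ===== SOURCE A (Python) =====
-- MASK_CHAR="_"
--
-- def proc_line_mask_short_word (line,lv,slv):
--     """
--     lv30 短い単語をマスクする
--         lv30 短い単語を1単語以上マスクする
--         lv31 短い単語を2単語以上マスクする
--         lv39 短い単語を10単語以上マスクする
--     """
--
--     di_len=make_len_dict(line)
--     wlenkeys=di_len.keys()
--     wlenkeys=sorted(wlenkeys,reverse=False)
--     wwordcounter=0
--     w_del_count=lv-slv+1
--     w_del_len=0
--     for wchklen in wlenkeys: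
--         wwordcounter=wwordcounter+di_len[wchklen]
--         if wwordcounter>=w_del_count:
--             w_del_len=wchklen
--             break
--     #if w_del_len==0:
--     #    return ""
--     w_words=line.split(" ")
--     w_ret=list()
--     for w_word in w_words:
--         if len(w_word)<=w_del_len:
--             w_ret.append(MASK_CHAR*len(w_word))
--         else:
--             w_ret.append(w_word)
--     return " ".join(w_ret)
--
-- def make_len_dict(line):
--     w_words=line.split(" ")
--     di_len=dict()
--     for wele in w_words:
--         wlen=len(wele)
--         if wlen not in di_len:
--             di_len[wlen]=0
--         di_len[wlen]=di_len[wlen]+1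
--     return di_len
-- ===== SOURCE B (Python) =====
-- MASK_CHAR = "_"
--
-- def proc_line_mask_short_word(line, lv, slv):
--     words = line.split(" ")
--     lengths = sorted(len(w) for w in words)
--     c = lv - slv + 1
--     if c > len(lengths):
--         w_del_len = 0
--     else:
--         w_del_len = lengths[max(c, 1) - 1]
--     return " ".join(MASK_CHAR * len(w) if len(w) <= w_del_len else w
--                     for w in words)
-- ===== Notes on version B (the rewrite author's own statement) =====
-- stated objective: simpler
-- what changed: B drops A's length-histogram dict, key sort and cumulative-count break loop and reads the masking threshold directly as the c-th order statistic of the sorted list of word lengths, then does the same single masking pass.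
import Mathlib
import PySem

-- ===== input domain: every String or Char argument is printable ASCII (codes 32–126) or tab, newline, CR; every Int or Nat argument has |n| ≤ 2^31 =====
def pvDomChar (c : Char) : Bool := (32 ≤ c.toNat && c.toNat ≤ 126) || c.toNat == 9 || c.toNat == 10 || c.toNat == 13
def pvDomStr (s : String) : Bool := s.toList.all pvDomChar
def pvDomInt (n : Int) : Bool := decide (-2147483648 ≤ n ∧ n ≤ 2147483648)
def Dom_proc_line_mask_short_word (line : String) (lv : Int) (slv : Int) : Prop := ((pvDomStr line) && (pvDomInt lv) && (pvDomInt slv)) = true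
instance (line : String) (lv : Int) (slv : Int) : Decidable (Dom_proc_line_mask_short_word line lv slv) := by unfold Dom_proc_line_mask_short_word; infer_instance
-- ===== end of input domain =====

-- B replaces A's length-histogram dict and cumulative-count scan by an order statistic on the
-- sorted list of word lengths (same masking pass); objective: simpler, no speed claim.

-- ===== PORT A =====
-- make_len_dict: histogram of word lengths (dict insertion order = first occurrence)
def pvMakeLenDict (line : String) : PySem.Dict Int Int :=
  let w_words := (PySem.Str.split? line " ").getD []  -- sep " " is non-empty: split? is always `some` here
  w_words.foldl (fun di wele =>
    let wlen := PySem.Str.len wele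
    let di := if di.contains wlen then di else di.insert wlen 0
    di.insert wlen (di.getD wlen 0 + 1)) PySem.Dict.empty

-- the 'for wchklen in wlenkeys: … break' loop of A (keys come from the dict, so getD's default is never used)
def pvLenLoop (di : PySem.Dict Int Int) (w_del_count : Int) : List Int → Int → Int
  | [], _ => 0
  | wchklen :: rest, wwordcounter =>
    let wwordcounter := wwordcounter + di.getD wchklen 0
    if wwordcounter ≥ w_del_count then wchklen
    else pvLenLoop di w_del_count rest wwordcounter

def proc_line_mask_short_word (line : String) (lv : Int) (slv : Int) : String :=
  let di_len := pvMakeLenDict line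
  let wlenkeys := PySem.List.sorted di_len.keys (fun x => x)
  let w_del_count := lv - slv + 1
  let w_del_len := pvLenLoop di_len w_del_count wlenkeys 0
  let w_words := (PySem.Str.split? line " ").getD []
  let w_ret := w_words.foldl (fun acc w_word =>
    if PySem.Str.len w_word ≤ w_del_len then
      acc ++ [String.ofList (PySem.List.pyRepeat ['_'] (PySem.Str.len w_word))]  -- MASK_CHAR*len(w_word)
    else acc ++ [w_word]) []
  PySem.Str.join " " w_ret

-- ===== PORT B =====
def proc_line_mask_short_word_alt (line : String) (lv : Int) (slv : Int) : String :=
  let words := (PySem.Str.split? line " ").getD []  -- sep " " is non-empty: split? is always `some` here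
  let lengths := PySem.List.sorted (words.map PySem.Str.len) (fun x => x)
  let c := lv - slv + 1
  let w_del_len : Int :=
    if c > (lengths.length : Int) then 0
    else PySem.List.pyGetD lengths (max c 1 - 1) 0  -- lengths[max(c,1)-1]; index always in range (split(" ") yields ≥ 1 word)
  PySem.Str.join " " (words.map (fun w =>
    if PySem.Str.len w ≤ w_del_len then String.ofList (PySem.List.pyRepeat ['_'] (PySem.Str.len w)) else w))

-- ===== PRECONDITION & SPEC =====
def Spec_proc_line_mask_short_word (line : String) (lv : Int) (slv : Int) (out : String) : Prop := out = proc_line_mask_short_word_alt line lv slv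
instance (line : String) (lv : Int) (slv : Int) (out : String) : Decidable (Spec_proc_line_mask_short_word line lv slv out) := by unfold Spec_proc_line_mask_short_word; infer_instance

-- ===== CLAIM (what is proved, stated in full; the proofs are below) =====
def Claim_equal_proc_line_mask_short_word : Prop := ∀ (line : String) (lv : Int) (slv : Int), Dom_proc_line_mask_short_word line lv slv → Spec_proc_line_mask_short_word line lv slv (proc_line_mask_short_word line lv slv)

-- ===== LEMMAS AND PROOFS =====

theorem pvStep_eq (di : PySem.Dict Int Int) (k : Int) :
    (let di' := if di.contains k then di else di.insert k 0;
     di'.insert k (di'.getD k 0 + 1)) = di.modify k 0 (· + 1) := by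
  by_cases h : di.contains k
  · simp [h, PySem.Dict.modify]
  · have hAll : ∀ p ∈ di.items, (p.1 == k) = false := by
      intro p hp
      rcases Bool.eq_false_or_eq_true (p.1 == k) with ht | hf
      · exact absurd (by simp only [PySem.Dict.contains]; exact List.any_eq_true.2 ⟨p, hp, ht⟩) h
      · exact hf
    have hgd : di.getD k 0 = 0 := by
      simp only [PySem.Dict.getD, PySem.Dict.get?]
      rw [List.find?_eq_none.2 (fun p hp => by simp [hAll p hp])]
      rfl
    have hgd2 : (di.insert k 0).getD k 0 = 0 := by simp [PySem.Dict.getD]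
    simp only [h, Bool.false_eq_true, if_false, PySem.Dict.modify, hgd, hgd2]
    simp only [PySem.Dict.insert, PySem.Dict.contains] at *
    rw [if_neg h, if_neg h]
    have hany : ((di.items ++ [((k : Int), (0 : Int))]).any fun p => p.1 == k) = true := by
      simp
    simp only [hany, if_true]
    apply PySem.Dict.ext
    simp only [List.map_append]
    congr 1
    · exact (List.map_congr_left fun p hp => by simp [hAll p hp]).trans (List.map_id _)
    · simp

theorem pvMakeLenDict_eq (line : String) :
    pvMakeLenDict line =
      PySem.Dict.counter (((PySem.Str.split? line " ").getD []).map PySem.Str.len) := by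
  unfold pvMakeLenDict
  rw [PySem.Dict.counter_eq_foldl, List.foldl_map]
  exact congrFun (congrArg (fun f => List.foldl f PySem.Dict.empty)
    (funext₂ fun di w => pvStep_eq di (PySem.Str.len w))) _

theorem pvCount_flatMap (cnt : Int → Nat) (x : Int) :
    ∀ (K : List Int), K.Nodup →
      ((K.flatMap fun k => List.replicate (cnt k) k).count x) = if x ∈ K then cnt x else 0 := by
  intro K
  induction K with
  | nil => simp
  | cons k t ih =>
    intro hnd
    rcases List.nodup_cons.1 hnd with ⟨hk, hnt⟩
    simp only [List.flatMap_cons, List.count_append, ih hnt, List.count_replicate, List.mem_cons]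
    by_cases hx : x = k
    · subst hx
      simp [hk]
    · simp [hx, Ne.symm hx]

theorem pvSortGroup (ls : List Int) :
    PySem.List.sorted ls (fun x => x) =
      (PySem.List.sorted (PySem.Set.ofList ls) (fun x => x)).flatMap
        (fun k => List.replicate (ls.count k) k) := by
  have hndK : (PySem.List.sorted (PySem.Set.ofList ls) (fun x => x)).Nodup :=
    (PySem.List.sorted_perm _ _ _).nodup_iff.2 (PySem.Set.nodup_ofList ls)
  apply PySem.List.sorted_id_eq_of_perm_of_pairwise
  · -- Perm
    rw [List.perm_iff_count]
    intro x
    rw [pvCount_flatMap _ x _ hndK]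
    by_cases hx : x ∈ ls
    · rw [if_pos]
      rw [PySem.List.mem_sorted]
      exact (PySem.Set.mem_ofList _ _).2 hx
    · rw [if_neg, List.count_eq_zero.2 hx]
      rw [PySem.List.mem_sorted]
      exact fun hmem => hx ((PySem.Set.mem_ofList _ _).1 hmem)
  · -- Pairwise ≤
    have key : ∀ (K : List Int), K.Pairwise (· < ·) →
        (K.flatMap fun k => List.replicate (ls.count k) k).Pairwise (· ≤ ·) := by
      intro K
      induction K with
      | nil => simp
      | cons k t ih =>
        intro hp
        rcases List.pairwise_cons.1 hp with ⟨hkt, hpt⟩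
        simp only [List.flatMap_cons]
        rw [List.pairwise_append]
        refine ⟨List.pairwise_replicate.2 (Or.inr le_rfl), ih hpt, ?_⟩
        intro a ha b hb
        rw [List.eq_of_mem_replicate ha]
        rcases List.mem_flatMap.1 hb with ⟨k', hk', hbk'⟩
        rw [List.eq_of_mem_replicate hbk']
        exact le_of_lt (hkt k' hk')
    exact key _ (PySem.List.sorted_ofList_pairwise_lt ls)

theorem pvLenLoop_eq (di : PySem.Dict Int Int) (cnt : Int → Nat) (c : Int) :
    ∀ (K : List Int) (acc : Int), (∀ k ∈ K, di.getD k 0 = (cnt k : Int) ∧ 0 < cnt k) →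
      pvLenLoop di c K acc =
        (if c - acc > (((K.flatMap fun k => List.replicate (cnt k) k).length : Int)) then 0
         else (K.flatMap fun k => List.replicate (cnt k) k).getD (max (c - acc) 1 - 1).toNat 0) := by
  intro K
  induction K with
  | nil =>
    intro acc _
    simp only [pvLenLoop, List.flatMap_nil, List.length_nil]
    split <;> simp
  | cons k t ih =>
    intro acc h
    obtain ⟨hg, hpos⟩ := h k (by simp)
    have ht : ∀ k' ∈ t, di.getD k' 0 = (cnt k' : Int) ∧ 0 < cnt k' :=
      fun k' hk' => h k' (List.mem_cons_of_mem _ hk')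
    simp only [pvLenLoop, hg, List.flatMap_cons, List.length_append, List.length_replicate]
    by_cases hc : acc + (cnt k : Int) ≥ c
    · rw [if_pos hc, if_neg (by push_cast; omega)]
      have hi : (max (c - acc) 1 - 1).toNat < cnt k := by omega
      rw [List.getD_append _ _ _ _ (by simpa using hi),
          List.getD_eq_getElem _ _ (by simpa using hi), List.getElem_replicate]
    · rw [if_neg hc, ih (acc + (cnt k : Int)) ht]
      have hL : c - (acc + (cnt k : Int)) = c - acc - cnt k := by ring
      rw [hL]
      by_cases h2 : c - acc - (cnt k : Int) > ((t.flatMap fun k => List.replicate (cnt k) k).length : Int)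
      · rw [if_pos h2, if_pos (by push_cast at h2 ⊢; omega)]
      · rw [if_neg h2, if_neg (by push_cast at h2 ⊢; omega)]
        rw [List.getD_append_right _ _ _ _ (by simp; omega)]
        congr 1
        simp only [List.length_replicate]
        omega

theorem pvMask_eq (ws : List String) (t : Int) :
    ws.foldl (fun acc w =>
      if PySem.Str.len w ≤ t then acc ++ [String.ofList (PySem.List.pyRepeat ['_'] (PySem.Str.len w))]
      else acc ++ [w]) [] =
    ws.map (fun w =>
      if PySem.Str.len w ≤ t then String.ofList (PySem.List.pyRepeat ['_'] (PySem.Str.len w)) else w) := by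
  rw [PySem.List.foldl_congr_mem ws _
      (fun acc w => acc ++ [if PySem.Str.len w ≤ t then String.ofList (PySem.List.pyRepeat ['_'] (PySem.Str.len w)) else w])
      [] (fun acc w _ => by
        show _ = acc ++ [if PySem.Str.len w ≤ t then String.ofList (PySem.List.pyRepeat ['_'] (PySem.Str.len w)) else w]
        split_ifs <;> rfl)]
  rw [PySem.List.foldl_append_singleton_eq_map, List.nil_append]

-- ===== VERDICT (by name: the statement is the Claim_ definition above) =====
theorem proc_line_mask_short_word_spec : Claim_equal_proc_line_mask_short_word := by
  intro line lv slv _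
  show proc_line_mask_short_word line lv slv = proc_line_mask_short_word_alt line lv slv
  simp only [proc_line_mask_short_word, proc_line_mask_short_word_alt]
  set ws := (PySem.Str.split? line " ").getD [] with hws
  set ls := ws.map PySem.Str.len with hls
  set c := lv - slv + 1 with hc
  have hdict := pvMakeLenDict_eq line
  have hgroup := pvSortGroup ls
  have hth : pvLenLoop (pvMakeLenDict line) c (PySem.List.sorted (pvMakeLenDict line).keys (fun x => x)) 0 =
      (if c > ((PySem.List.sorted ls (fun x => x)).length : Int) then 0
       else PySem.List.pyGetD (PySem.List.sorted ls (fun x => x)) (max c 1 - 1) 0) := by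
    have hkeys : (pvMakeLenDict line).keys = PySem.Set.ofList ls := by
      rw [hdict, PySem.Dict.keys_counter]
    rw [hkeys]
    rw [pvLenLoop_eq (pvMakeLenDict line) (fun k => ls.count k) c
        (PySem.List.sorted (PySem.Set.ofList ls) (fun x => x)) 0 ?hh]
    case hh =>
      intro k hk
      have hmem : k ∈ ls := (PySem.Set.mem_ofList _ _).1 ((PySem.List.mem_sorted _ _ _ _).1 hk)
      exact ⟨by rw [hdict]; exact PySem.Dict.getD_counter ls k, List.count_pos_iff.2 hmem⟩
    rw [← hgroup, sub_zero,
        PySem.List.pyGetD_of_nonneg _ _ (by omega : (0:Int) ≤ max c 1 - 1)]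
  rw [hth, pvMask_eq]
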